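-- pv_equiv track=rewrite | github.com/phuctruong/solace-browser | solace_cli.py | _extract_output_flags
-- ===== SOURCE A (Python) =====
-- def _extract_output_flags(argv: list[str]) -> tuple[list[str], bool, bool]:
--     cleaned: list[str] = []
--     quiet = False
--     raw = False
--
--     for arg in argv:
--         if arg in ("-q", "--quiet"):
--             quiet = True
--         elif arg == "--raw":
--             raw = True
--         else:
--             cleaned.append(arg)
--
--     return cleaned, quiet, raw
-- ===== SOURCE B (Python) =====
-- def _extract_output_flags(argv: list[str]) -> tuple[list[str], bool, bool]:
--     quiet = any(a in ("-q", "--quiet") for a in argv)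
--     raw = "--raw" in argv
--     cleaned = [a for a in argv if a not in ("-q", "--quiet", "--raw")]
--     return cleaned, quiet, raw
-- ===== Notes on version B (the rewrite author's own statement) =====
-- stated objective: idiomatic
-- what changed: Replaces the single accumulating branch-and-append loop with three independent passes: any() for quiet, membership for raw, and a filtering comprehension for cleaned.
import Mathlib
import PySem

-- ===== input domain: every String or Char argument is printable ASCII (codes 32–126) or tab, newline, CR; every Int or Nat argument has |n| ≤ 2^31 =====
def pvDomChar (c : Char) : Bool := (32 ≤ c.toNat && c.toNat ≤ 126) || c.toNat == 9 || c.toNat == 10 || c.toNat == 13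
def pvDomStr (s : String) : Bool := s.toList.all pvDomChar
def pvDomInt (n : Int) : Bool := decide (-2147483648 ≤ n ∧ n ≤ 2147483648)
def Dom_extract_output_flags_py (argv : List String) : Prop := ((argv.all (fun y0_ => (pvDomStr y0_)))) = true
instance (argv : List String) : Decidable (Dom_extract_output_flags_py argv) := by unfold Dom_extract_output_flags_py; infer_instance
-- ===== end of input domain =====

-- B replaces A's single accumulating branch-and-append loop with three single-purpose passes (idiomatic).

-- ===== PORT A =====
-- one loop carrying (cleaned, quiet, raw); branches in A's order
def extract_output_flags_py (argv : List String) : List String × Bool × Bool :=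
  let st := argv.foldl
    (fun (acc : List String × Bool × Bool) arg =>
      let (cleaned, quiet, raw) := acc
      if arg = "-q" ∨ arg = "--quiet" then (cleaned, true, raw)
      else if arg = "--raw" then (cleaned, quiet, true)
      else (cleaned ++ [arg], quiet, raw))
    ([], false, false)
  st

-- ===== PORT B =====
-- three independent passes: any(), membership, filtering comprehension
def extract_output_flags_py_alt (argv : List String) : List String × Bool × Bool :=
  let quiet := argv.any (fun a => a = "-q" ∨ a = "--quiet")
  let raw := argv.contains "--raw"
  let cleaned := argv.filter (fun a => ¬ (a = "-q" ∨ a = "--quiet" ∨ a = "--raw"))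
  (cleaned, quiet, raw)

-- ===== PRECONDITION & SPEC =====
def Spec_extract_output_flags_py (argv : List String) (out : List String × Bool × Bool) : Prop := out = extract_output_flags_py_alt argv
instance (argv : List String) (out : List String × Bool × Bool) : Decidable (Spec_extract_output_flags_py argv out) := by unfold Spec_extract_output_flags_py; infer_instance

-- ===== CLAIM =====
def Claim_equal_extract_output_flags_py : Prop := ∀ (argv : List String), Dom_extract_output_flags_py argv → Spec_extract_output_flags_py argv (extract_output_flags_py argv)

-- ===== LEMMAS AND PROOFS =====

-- loop invariant: A's fold from any accumulator state
theorem extract_loop_inv (argv : List String) (cl : List String) (q r : Bool) :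
    argv.foldl
      (fun (acc : List String × Bool × Bool) arg =>
        let (cleaned, quiet, raw) := acc
        if arg = "-q" ∨ arg = "--quiet" then (cleaned, true, raw)
        else if arg = "--raw" then (cleaned, quiet, true)
        else (cleaned ++ [arg], quiet, raw))
      (cl, q, r)
    = (cl ++ argv.filter (fun a => ¬ (a = "-q" ∨ a = "--quiet" ∨ a = "--raw")),
       q || argv.any (fun a => a = "-q" ∨ a = "--quiet"),
       r || argv.contains "--raw") := by
  induction argv generalizing cl q r with
  | nil => simp
  | cons x xs ih =>
    simp only [List.foldl_cons, List.filter_cons, List.any_cons, List.contains_cons]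
    by_cases hq : x = "-q" ∨ x = "--quiet"
    · rw [if_pos hq, ih]
      have hr : ¬ x = "--raw" := by rcases hq with h | h <;> subst h <;> decide
      have hb : ("--raw" == x) = false := beq_eq_false_iff_ne.mpr (fun h => hr h.symm)
      simp [hb]
      rcases hq with h | h <;> simp [h]
    · rw [if_neg hq]
      by_cases hraw : x = "--raw"
      · rw [if_pos hraw, ih]
        simp [hraw]
      · rw [if_neg hraw, ih]
        have hb : ("--raw" == x) = false := beq_eq_false_iff_ne.mpr (fun h => hraw h.symm)
        simp [hq, hraw, hb, List.append_assoc]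

-- ===== VERDICT =====
theorem extract_output_flags_py_spec : Claim_equal_extract_output_flags_py := by
  intro argv _
  show extract_output_flags_py argv = extract_output_flags_py_alt argv
  unfold extract_output_flags_py extract_output_flags_py_alt
  rw [extract_loop_inv]
  simp
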